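-- pv_equiv track=rewrite | github.com/benrachmut/cluster_fed_learning | entities.py | get_non_center_to_which_center_dict
-- ===== SOURCE A (Python) =====
-- def get_non_center_to_which_center_dict(l2_of_non_center_to_center):
--     one_to_one_dict = {}
--     for none_center,dict_ in l2_of_non_center_to_center.items():
--         one_to_one_dict[none_center] =  min(dict_, key=dict_.get)
--
--     dict_ = one_to_one_dict
--     ans = {}
--     for key, value in dict_.items():
--         # Add the key to the list of the corresponding value in new_dict
--         if value not in ans:
--             ans[value] = []  # Initialize a list for the value if not present
--         ans[value].append(key)
--
--     return ans
-- ===== SOURCE B (Python) =====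
-- def get_non_center_to_which_center_dict(l2_of_non_center_to_center):
--     # Flatten to (non_center, nearest_center) pairs: nearest = first key holding
--     # the minimum value (same as min(d, key=d.get)); then build each group by
--     # filtering the flat pair list, keys in order of first appearance.
--     pairs = []
--     for non_center, dict_ in l2_of_non_center_to_center.items():
--         m = min(dict_.values())
--         pairs.append((non_center, next(c for c, v in dict_.items() if v == m)))
--     seen = []
--     for _, c in pairs:
--         if c not in seen:
--             seen.append(c)
--     return {c: [nc for nc, c2 in pairs if c2 == c] for c in seen}
-- ===== Notes on version B (the rewrite author's own statement) =====
-- stated objective: alternative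
-- what changed: B first flattens the input into a list of (non_center, nearest_center) pairs, computing each nearest center as the first key attaining min(values) instead of min(keys, key=get), then builds the result by a dict comprehension that filters the flat pair list once per distinct center (group-by-filter), instead of A's incremental dict grouping with per-key append.
import Mathlib
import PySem

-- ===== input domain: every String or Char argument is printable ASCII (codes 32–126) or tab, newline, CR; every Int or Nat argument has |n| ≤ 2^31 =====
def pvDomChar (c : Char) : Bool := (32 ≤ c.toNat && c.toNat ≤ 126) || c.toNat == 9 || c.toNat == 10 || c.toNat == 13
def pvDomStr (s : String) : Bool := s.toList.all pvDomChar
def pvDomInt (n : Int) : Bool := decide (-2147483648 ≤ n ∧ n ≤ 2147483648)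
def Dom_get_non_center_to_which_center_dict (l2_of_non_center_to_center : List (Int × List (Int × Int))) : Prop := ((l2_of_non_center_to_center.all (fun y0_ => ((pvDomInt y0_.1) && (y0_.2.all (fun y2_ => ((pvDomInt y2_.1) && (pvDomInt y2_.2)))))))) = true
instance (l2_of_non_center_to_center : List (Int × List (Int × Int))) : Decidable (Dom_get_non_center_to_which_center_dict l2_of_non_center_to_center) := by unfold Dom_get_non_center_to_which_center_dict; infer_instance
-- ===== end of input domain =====

-- B flattens to (non_center, nearest_center) pairs (nearest = first key attaining min(values))
-- and builds each group by filtering that flat list per distinct center, instead of A's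
-- intermediate one-to-one dict and incremental dict grouping (objective: alternative).


-- ===== PORT A =====
-- min(dict_, key=dict_.get): first key of the inner dict with minimal value; on the assoc-list
-- encoding this is the first pair with minimal second component (PySem.List.min? with key .2).
-- The .getD 0 default is reached only where Python's min raises ValueError (empty inner dict),
-- which Pre_ excludes.
def pvBestCenter (dict_ : List (Int × Int)) : Int :=
  ((PySem.List.min? dict_ (fun q => q.2)).map (fun q => q.1)).getD 0

def get_non_center_to_which_center_dict (l2_of_non_center_to_center : List (Int × List (Int × Int))) : List (Int × List Int) :=
  let one_to_one_dict : PySem.Dict Int Int :=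
    l2_of_non_center_to_center.foldl
      (fun acc p => acc.insert p.1 (pvBestCenter p.2)) PySem.Dict.empty
  let ans : PySem.Dict Int (List Int) :=
    one_to_one_dict.items.foldl
      (fun ans kv =>
        let ans' := if ans.contains kv.2 then ans else ans.insert kv.2 []
        ans'.modify kv.2 [] (fun l => l ++ [kv.1]))
      PySem.Dict.empty
  ans.items

-- ===== PORT B =====
-- m = min(dict_.values()); next(c for c, v in dict_.items() if v == m).  The .getD 0 defaults
-- are reached only on an empty inner dict, where Python's min raises (excluded by Pre_).
def pvBestCenterAlt (dict_ : List (Int × Int)) : Int :=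
  let m := (PySem.List.min? (dict_.map (fun q => q.2)) (fun v => v)).getD 0
  ((dict_.find? (fun q => q.2 == m)).map (fun q => q.1)).getD 0

def get_non_center_to_which_center_dict_alt (l2_of_non_center_to_center : List (Int × List (Int × Int))) : List (Int × List Int) :=
  let pairs : List (Int × Int) :=
    l2_of_non_center_to_center.map (fun p => (p.1, pvBestCenterAlt p.2))
  let seen : List Int :=
    pairs.foldl (fun s q => if q.2 ∈ s then s else s ++ [q.2]) []
  seen.map (fun c => (c, (pairs.filter (fun q => q.2 == c)).map (fun q => q.1)))

-- ===== PRECONDITION & SPEC =====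
-- Pre_ excludes inputs with an empty inner dict, on which Python's min raises ValueError in
-- both A and B, and assoc lists with duplicate outer keys, which are not a faithful encoding
-- of the Python dict argument (a dict cannot hold duplicate keys).
def Pre_get_non_center_to_which_center_dict (l2_of_non_center_to_center : List (Int × List (Int × Int))) : Prop :=
  (l2_of_non_center_to_center.map (fun p => p.1)).Nodup ∧
  ∀ p ∈ l2_of_non_center_to_center, p.2 ≠ []
instance (l2_of_non_center_to_center : List (Int × List (Int × Int))) : Decidable (Pre_get_non_center_to_which_center_dict l2_of_non_center_to_center) := by unfold Pre_get_non_center_to_which_center_dict; infer_instance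

def pvWitness_get_non_center_to_which_center_dict : (List (Int × List (Int × Int))) :=
  [(1, [(10, 3), (20, 1)]), (2, [(10, 0), (20, 5)]), (3, [(20, 2)])]

def Spec_get_non_center_to_which_center_dict (l2_of_non_center_to_center : List (Int × List (Int × Int))) (out : List (Int × List Int)) : Prop := out = get_non_center_to_which_center_dict_alt l2_of_non_center_to_center
instance (l2_of_non_center_to_center : List (Int × List (Int × Int))) (out : List (Int × List Int)) : Decidable (Spec_get_non_center_to_which_center_dict l2_of_non_center_to_center out) := by unfold Spec_get_non_center_to_which_center_dict; infer_instance

-- ===== CLAIM =====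
def Claim_equal_get_non_center_to_which_center_dict : Prop := ∀ (l2_of_non_center_to_center : List (Int × List (Int × Int))), Dom_get_non_center_to_which_center_dict l2_of_non_center_to_center → Pre_get_non_center_to_which_center_dict l2_of_non_center_to_center → Spec_get_non_center_to_which_center_dict l2_of_non_center_to_center (get_non_center_to_which_center_dict l2_of_non_center_to_center)


-- ===== LEMMAS AND PROOFS =====

-- min-fold commutes with mapping the key out of the elements.
lemma min?_fold_map {α : Type} (key : α → Int) (xs : List α) : ∀ (acc : Option α),
    List.foldl (fun acc x => match acc with
      | none => some x
      | some m => if x < m then some x else some m) (acc.map key) (xs.map key)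
    = (List.foldl (fun acc x => match acc with
      | none => some x
      | some m => if key x < key m then some x else some m) acc xs).map key := by
  induction xs with
  | nil => intro acc; simp
  | cons x t ih =>
    intro acc
    cases acc with
    | none => simpa using ih (some x)
    | some m =>
      by_cases h : key x < key m
      · simpa [h] using ih (some x)
      · simpa [h] using ih (some m)

-- min over the mapped keys is the key of the first minimal element.
lemma min?_map_key {α : Type} (key : α → Int) (xs : List α) :
    PySem.List.min? (xs.map key) (fun v => v) = (PySem.List.min? xs key).map key := by
  unfold PySem.List.min?
  convert min?_fold_map key xs none using 2
  funext acc x; cases acc <;> rfl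

lemma min?_cons {α : Type} (key : α → Int) (a x : α) (t : List α) :
    PySem.List.min? (a :: x :: t) key
      = PySem.List.min? ((if key x < key a then x else a) :: t) key := by
  by_cases h : key x < key a <;> simp [PySem.List.min?, h]

lemma min?_cons_some {α : Type} (key : α → Int) (b : α) (t : List α) :
    ∃ M, PySem.List.min? (b :: t) key = some M := by
  cases h : PySem.List.min? (b :: t) key with
  | none => exact absurd ((PySem.List.min?_eq_none_iff _ _).mp h) (by simp)
  | some M => exact ⟨M, rfl⟩

-- the first element whose key equals the minimal key IS the first minimal element.
lemma find?_eq_min? {α : Type} (key : α → Int) : ∀ (xs : List α) (a : α),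
    (a :: xs).find? (fun x => key x == key (((PySem.List.min? (a :: xs) key)).getD a))
      = PySem.List.min? (a :: xs) key := by
  intro xs
  induction xs with
  | nil => intro a; simp [PySem.List.min?]
  | cons x t ih =>
    intro a
    rw [min?_cons]
    by_cases hxa : key x < key a
    · -- running min is x; the head a can never match (its key is strictly above the min)
      simp only [if_pos hxa]
      obtain ⟨M, hM⟩ := min?_cons_some key x t
      have hMx : key M ≤ key x := PySem.List.min?_isMin hM x (by simp)
      have ihb := ih x
      rw [hM] at ihb ⊢
      simp only [Option.getD_some] at ihb ⊢
      rw [List.find?_cons_of_neg (by simp; omega)]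
      exact ihb
    · simp only [if_neg hxa]
      obtain ⟨M, hM⟩ := min?_cons_some key a t
      have hMa : key M ≤ key a := PySem.List.min?_isMin hM a (by simp)
      have ihb := ih a
      rw [hM] at ihb ⊢
      simp only [Option.getD_some] at ihb ⊢
      by_cases ha : key a = key M
      · have hfind : (a :: t).find? (fun y => key y == key M) = some a :=
          List.find?_cons_of_pos (by simp [ha])
        have : a = M := by rw [hfind] at ihb; exact Option.some.inj ihb
        rw [List.find?_cons_of_pos (by simp [ha]), this]
      · rw [List.find?_cons_of_neg (by simp [ha]),
            List.find?_cons_of_neg (by simp; omega)]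
        rw [List.find?_cons_of_neg (by simp [ha])] at ihb
        exact ihb

-- min(values) + first match computes exactly min(pairs, key=.2).
lemma bestCenterAlt_eq (d : List (Int × Int)) (hd : d ≠ []) :
    pvBestCenterAlt d = pvBestCenter d := by
  obtain ⟨a, t, rfl⟩ := List.exists_cons_of_ne_nil hd
  obtain ⟨M, hM⟩ := min?_cons_some (fun q : Int × Int => q.2) a t
  unfold pvBestCenterAlt pvBestCenter
  rw [min?_map_key (fun q : Int × Int => q.2) (a :: t), hM]
  simp only [Option.map_some, Option.getD_some]
  have hfind := find?_eq_min? (fun q : Int × Int => q.2) t a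
  rw [hM] at hfind
  simp only [Option.getD_some] at hfind
  simp only [hfind, Option.map_some, Option.getD_some]

-- A's grouping step ('if value not in ans: ans[value] = []' then append) is a plain modify.
lemma groupStep_eq_modify (ans : PySem.Dict Int (List Int)) (kv : Int × Int) :
    (let ans' := if ans.contains kv.2 then ans else ans.insert kv.2 []
     ans'.modify kv.2 [] (fun l => l ++ [kv.1]))
      = ans.modify kv.2 [] (fun l => l ++ [kv.1]) := by
  by_cases h : ans.contains kv.2 = true
  · simp [h]
  · have h' : ans.contains kv.2 = false := by simpa using h
    simp [h, PySem.Dict.modify, PySem.Dict.getD_insert_self,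
      PySem.Dict.insert_insert_self, PySem.Dict.getD_of_not_contains _ _ h']

-- B's seen-loop is PySem.Set.ofList of the centers.
lemma seen_eq_ofList (pairs : List (Int × Int)) :
    pairs.foldl (fun s q => if q.2 ∈ s then s else s ++ [q.2]) []
      = PySem.Set.ofList (pairs.map (fun q => q.2)) := by
  rw [PySem.Set.ofList_eq_foldl, List.foldl_map]
  apply PySem.List.foldl_congr_mem
  intro s q _
  by_cases h : q.2 ∈ s <;>
    simp [PySem.Set.add, PySem.Set.contains, h]

-- ===== VERDICT =====
theorem get_non_center_to_which_center_dict_spec : Claim_equal_get_non_center_to_which_center_dict := by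
  intro l2 _ hpre
  unfold Spec_get_non_center_to_which_center_dict
  unfold get_non_center_to_which_center_dict get_non_center_to_which_center_dict_alt
  simp only []
  -- both nearest-center computations agree on the (nonempty) inner dicts
  have hpairs : l2.map (fun p => (p.1, pvBestCenterAlt p.2))
      = l2.map (fun p => (p.1, pvBestCenter p.2)) :=
    List.map_congr_left (fun p hp => by rw [bestCenterAlt_eq p.2 (hpre.2 p hp)])
  rw [hpairs, seen_eq_ofList]
  -- A: the first loop over fresh distinct keys just appends the pairs
  rw [PySem.Dict.items_foldl_insert_fresh l2 (fun p => p.1) (fun p => pvBestCenter p.2)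
        PySem.Dict.empty (fun a _ => by simp [PySem.Dict.contains_empty]) hpre.1]
  rw [show (PySem.Dict.empty : PySem.Dict Int Int).items = [] from rfl, List.nil_append]
  generalize List.map (fun p : Int × List (Int × Int) => (p.1, pvBestCenter p.2)) l2 = pairsA
  -- A: the grouping loop is a modify-fold over the swapped pairs
  rw [PySem.List.foldl_congr_mem _ _ _ _ (fun acc x _ => groupStep_eq_modify acc x)]
  rw [show pairsA.foldl (fun acc x => acc.modify x.2 [] (fun l => l ++ [x.1])) PySem.Dict.empty
        = (pairsA.map Prod.swap).foldl (fun d p => d.modify p.1 [] (fun l => l ++ [p.2]))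
            PySem.Dict.empty from by rw [List.foldl_map]; rfl]
  -- A: items of that dict = grouped lists over the distinct centers
  have hnd : ((pairsA.map Prod.swap).foldl
      (fun d p => d.modify p.1 [] (fun l => l ++ [p.2])) PySem.Dict.empty).keys.Nodup :=
    PySem.Dict.nodup_keys_foldl_modify_key _ (fun p : Int × Int => p.1) []
      (fun (_ : PySem.Dict Int (List Int)) (p : Int × Int) (l : List Int) => l ++ [p.2]) _ (by simp)
  rw [PySem.Dict.items_eq_map_keys _ hnd []]
  rw [PySem.Dict.keys_foldl_modify_key (pairsA.map Prod.swap) (fun p : Int × Int => p.1) []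
        (fun (_ : PySem.Dict Int (List Int)) (p : Int × Int) (l : List Int) => l ++ [p.2]) PySem.Dict.empty]
  have hkeys : PySem.Set.update (PySem.Dict.empty : PySem.Dict Int (List Int)).keys
      ((pairsA.map Prod.swap).map (fun p => p.1)) = PySem.Set.ofList (pairsA.map (fun q => q.2)) := by
    simp [PySem.Set.update, PySem.Set.ofList_eq_foldl, List.map_map, Function.comp_def,
      PySem.Dict.keys, PySem.Dict.empty]
  rw [hkeys]
  apply List.map_congr_left
  intro c _
  rw [PySem.Dict.getD_foldl_modify_append (pairsA.map Prod.swap) PySem.Dict.empty c]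
  simp [PySem.Dict.getD_empty, List.filter_map, List.map_map, Function.comp_def]
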